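-- pv_equiv track=rewrite | github.com/NineSunsInc/nillion-movement-poc | nillion_movement_poc/agent_modules/agent_modules/database/const/coingecko_id_map.py | prioritize_tokens
-- ===== SOURCE A (Python) =====
-- PRIORITIZED_ECOSYSTEMS = [
--     "polygon", "movement labs", "0g", "nillion", "arbitrum",
--     "bitcoin", "ethereum", "aptos", "sui", "binance smart chain"
-- ]
--
-- def prioritize_tokens(tokens):
--     """
--     Reorder the token list so that tokens from our prioritized ecosystems come first.
--     """
--     if not tokens:
--         return tokens
--
--     prioritized = []
--     others = []
--     for token in tokens:
--         token_name = token.get("name", "").lower()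
--         token_symbol = token.get("symbol", "").lower()
--         if any(ecosystem in token_name or ecosystem in token_symbol for ecosystem in PRIORITIZED_ECOSYSTEMS):
--             prioritized.append(token)
--         else:
--             others.append(token)
--     return prioritized + others
-- ===== SOURCE B (Python) =====
-- PRIORITIZED_ECOSYSTEMS = [
--     "polygon", "movement labs", "0g", "nillion", "arbitrum",
--     "bitcoin", "ethereum", "aptos", "sui", "binance smart chain"
-- ]
--
--
-- def _priority_key(token):
--     token_name = token.get("name", "").lower()
--     token_symbol = token.get("symbol", "").lower()
--     if any(e in token_name or e in token_symbol for e in PRIORITIZED_ECOSYSTEMS):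
--         return 0
--     return 1
--
--
-- def prioritize_tokens(tokens):
--     """
--     Reorder the token list so that tokens from our prioritized ecosystems come first.
--     """
--     if not tokens:
--         return tokens
--     return sorted(tokens, key=_priority_key)
-- ===== Notes on version B (the rewrite author's own statement) =====
-- stated objective: idiomatic
-- what changed: Replaces the explicit two-accumulator partition loop with a single stable sort on a binary key (0 = prioritized ecosystem substring found, 1 = not); sort stability preserves the within-group order, so the output is identical.
import Mathlib
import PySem

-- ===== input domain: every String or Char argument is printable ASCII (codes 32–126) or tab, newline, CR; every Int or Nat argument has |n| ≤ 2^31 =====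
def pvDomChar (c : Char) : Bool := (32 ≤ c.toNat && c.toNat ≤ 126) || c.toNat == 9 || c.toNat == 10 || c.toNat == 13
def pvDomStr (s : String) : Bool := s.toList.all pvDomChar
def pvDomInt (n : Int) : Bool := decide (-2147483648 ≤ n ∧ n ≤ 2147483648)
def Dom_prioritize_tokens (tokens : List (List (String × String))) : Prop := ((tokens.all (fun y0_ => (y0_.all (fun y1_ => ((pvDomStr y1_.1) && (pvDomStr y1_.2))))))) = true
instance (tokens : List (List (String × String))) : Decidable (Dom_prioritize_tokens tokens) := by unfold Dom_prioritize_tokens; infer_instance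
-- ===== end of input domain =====

-- B replaces A's explicit two-accumulator partition loop with a single stable sort on a
-- binary key (0 = prioritized, 1 = other); same result, more idiomatic (no speed claim).

-- ===== PORT A =====
def PRIORITIZED_ECOSYSTEMS : List String :=
  ["polygon", "movement labs", "0g", "nillion", "arbitrum",
   "bitcoin", "ethereum", "aptos", "sui", "binance smart chain"]

def prioritize_tokens (tokens : List (List (String × String))) : List (List (String × String)) :=
  if tokens = [] then tokens
  else
    let acc := tokens.foldl
      (fun (acc : List (List (String × String)) × List (List (String × String))) token =>
        let token_name := PySem.Str.lower ((PySem.Dict.mk token).getD "name" "")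
        let token_symbol := PySem.Str.lower ((PySem.Dict.mk token).getD "symbol" "")
        if PRIORITIZED_ECOSYSTEMS.any
            (fun e => PySem.Str.isIn e token_name || PySem.Str.isIn e token_symbol)
        then (acc.1 ++ [token], acc.2)
        else (acc.1, acc.2 ++ [token]))
      ([], [])
    acc.1 ++ acc.2

-- ===== PORT B =====
def priority_key (token : List (String × String)) : Int :=
  let token_name := PySem.Str.lower ((PySem.Dict.mk token).getD "name" "")
  let token_symbol := PySem.Str.lower ((PySem.Dict.mk token).getD "symbol" "")
  if PRIORITIZED_ECOSYSTEMS.any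
      (fun e => PySem.Str.isIn e token_name || PySem.Str.isIn e token_symbol)
  then 0 else 1

def prioritize_tokens_alt (tokens : List (List (String × String))) : List (List (String × String)) :=
  if tokens = [] then tokens
  else PySem.List.sorted tokens priority_key false

-- ===== PRECONDITION & SPEC =====
def Spec_prioritize_tokens (tokens : List (List (String × String))) (out : List (List (String × String))) : Prop := out = prioritize_tokens_alt tokens
instance (tokens : List (List (String × String))) (out : List (List (String × String))) : Decidable (Spec_prioritize_tokens tokens out) := by unfold Spec_prioritize_tokens; infer_instance

-- ===== CLAIM (what is proved, stated in full; the proofs are below) =====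
def Claim_equal_prioritize_tokens : Prop := ∀ (tokens : List (List (String × String))), Dom_prioritize_tokens tokens → Spec_prioritize_tokens tokens (prioritize_tokens tokens)

-- ===== LEMMAS AND PROOFS =====

theorem priority_key_zero_or_one (t : List (String × String)) :
    priority_key t = 0 ∨ priority_key t = 1 := by
  unfold priority_key
  by_cases h : (PRIORITIZED_ECOSYSTEMS.any
      (fun e => PySem.Str.isIn e (PySem.Str.lower ((PySem.Dict.mk t).getD "name" ""))
        || PySem.Str.isIn e (PySem.Str.lower ((PySem.Dict.mk t).getD "symbol" "")))) = true
  · left; rw [if_pos h]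
  · right; rw [if_neg h]

-- insertBy places x exactly at the boundary between the "before is false" prefix and the
-- "before is true" suffix
theorem insertBy_boundary {α : Type} (bef : α → α → Bool) (x : α) :
    ∀ (P O : List α), (∀ y ∈ P, bef x y = false) → (∀ z ∈ O, bef x z = true) →
      PySem.List.insertBy bef x (P ++ O) = P ++ x :: O := by
  intro P
  induction P with
  | nil =>
    intro O _ hO
    cases O with
    | nil => simp [PySem.List.insertBy]
    | cons z zs => simp [PySem.List.insertBy, hO z (by simp)]
  | cons y P ih =>
    intro O hP hO
    have hy : bef x y = false := hP y (by simp)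
    simp only [List.cons_append, PySem.List.insertBy, hy, Bool.false_eq_true, if_false]
    rw [ih O (fun y hy => hP y (by simp [hy])) hO]

-- the insertion-sort fold with the binary key keeps the state partitioned
theorem sort_loop :
    ∀ (xs P O : List (List (String × String))),
      (∀ y ∈ P, priority_key y = 0) → (∀ z ∈ O, priority_key z = 1) →
      xs.foldl (fun acc x =>
          PySem.List.insertBy (fun a b => decide (priority_key a < priority_key b)) x acc) (P ++ O)
        = (P ++ xs.filter (fun x => priority_key x == 0))
          ++ (O ++ xs.filter (fun x => priority_key x != 0)) := by
  intro xs
  induction xs with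
  | nil => intro P O _ _; simp
  | cons x xs ih =>
    intro P O hP hO
    rcases priority_key_zero_or_one x with h0 | h1
    · have hstep : PySem.List.insertBy (fun a b => decide (priority_key a < priority_key b)) x (P ++ O)
          = (P ++ [x]) ++ O := by
        rw [insertBy_boundary _ x P O
          (fun y hy => by simp [h0, hP y hy])
          (fun z hz => by simp [h0, hO z hz])]
        simp
      simp only [List.foldl_cons, hstep]
      rw [ih (P ++ [x]) O
        (fun y hy => by
          rcases List.mem_append.mp hy with h | h
          · exact hP y h
          · simp only [List.mem_singleton] at h; rw [h]; exact h0) hO]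
      simp [h0]
    · have hstep : PySem.List.insertBy (fun a b => decide (priority_key a < priority_key b)) x (P ++ O)
          = P ++ (O ++ [x]) := by
        rw [PySem.List.insertBy_of_forall_not_before _ x (P ++ O)
          (fun y hy => by
            rcases List.mem_append.mp hy with h | h
            · simp [h1, hP y h]
            · simp [h1, hO y h])]
        simp
      simp only [List.foldl_cons, hstep]
      rw [ih P (O ++ [x]) hP
        (fun z hz => by
          rcases List.mem_append.mp hz with h | h
          · exact hO z h
          · simp only [List.mem_singleton] at h; rw [h]; exact h1)]
      simp [h1]

-- A's partition fold, characterised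
theorem partition_loop :
    ∀ (xs P O : List (List (String × String))),
      xs.foldl
        (fun (acc : List (List (String × String)) × List (List (String × String))) token =>
          if PRIORITIZED_ECOSYSTEMS.any
              (fun e => PySem.Str.isIn e (PySem.Str.lower ((PySem.Dict.mk token).getD "name" ""))
                || PySem.Str.isIn e (PySem.Str.lower ((PySem.Dict.mk token).getD "symbol" "")))
          then (acc.1 ++ [token], acc.2)
          else (acc.1, acc.2 ++ [token]))
        (P, O)
      = (P ++ xs.filter (fun x => priority_key x == 0),
         O ++ xs.filter (fun x => priority_key x != 0)) := by
  intro xs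
  induction xs with
  | nil => intro P O; simp
  | cons x xs ih =>
    intro P O
    by_cases h : (PRIORITIZED_ECOSYSTEMS.any
        (fun e => PySem.Str.isIn e (PySem.Str.lower ((PySem.Dict.mk x).getD "name" ""))
          || PySem.Str.isIn e (PySem.Str.lower ((PySem.Dict.mk x).getD "symbol" "")))) = true
    · have hk : priority_key x = 0 := by unfold priority_key; rw [if_pos h]
      simp only [List.foldl_cons, h, if_true]
      rw [ih (P ++ [x]) O]
      simp [hk]
    · have hk : priority_key x = 1 := by unfold priority_key; rw [if_neg h]
      simp only [List.foldl_cons, h, Bool.false_eq_true, if_false]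
      rw [ih P (O ++ [x])]
      simp [hk]

-- ===== VERDICT (by name: the statement is the Claim_ definition above) =====
theorem prioritize_tokens_spec : Claim_equal_prioritize_tokens := by
  intro tokens _
  unfold Spec_prioritize_tokens prioritize_tokens prioritize_tokens_alt
  by_cases h : tokens = []
  · simp [h]
  · simp only [h, if_false]
    have hB := sort_loop tokens [] [] (by simp) (by simp)
    simp only [List.nil_append] at hB
    have hA := partition_loop tokens [] []
    simp only [List.nil_append] at hA
    rw [PySem.List.sorted_eq_foldl_insertBy, hB, hA]
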